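-- pv_equiv track=rewrite | github.com/catohaste/shucks | shucks/main.py | hyphen
-- ===== SOURCE A (Python) =====
-- def hyphen(word, words):
--     hyphens = []
--     for i in range(len(word)):
--         if word[i] == '-':
--             hyphens.append(i)
--     missing = {}
--     for i in words:
--         if len(i) == len(word):
--             key = list(i)
--             for j in hyphens:
--                 key[j] = '-'
--             key = ''.join(key)
--             key = key.lower()
--             if key in missing:
--                 missing[key].append(i)
--             else:
--                 missing[key] = [i]
--     if word in missing:
--         return missing[word]
--     else:
--         return
-- ===== SOURCE B (Python) =====
-- def hyphen(word, words):
--     fixed = [k for k in range(len(word)) if word[k] != '-']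
--     result = []
--     for i in words:
--         if len(i) == len(word):
--             low = i.lower()
--             if all(low[k] == word[k] for k in fixed):
--                 result.append(i)
--     return result if result else None
-- ===== Notes on version B (the rewrite author's own statement) =====
-- stated objective: simpler
-- what changed: B drops A's grouping dict and masked-lowercased-key string construction entirely: it precomputes the fixed (non-hyphen) positions of the pattern once and filters the candidates by comparing the lowercased candidate to the pattern at those positions, returning the kept list or None.
import Mathlib
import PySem

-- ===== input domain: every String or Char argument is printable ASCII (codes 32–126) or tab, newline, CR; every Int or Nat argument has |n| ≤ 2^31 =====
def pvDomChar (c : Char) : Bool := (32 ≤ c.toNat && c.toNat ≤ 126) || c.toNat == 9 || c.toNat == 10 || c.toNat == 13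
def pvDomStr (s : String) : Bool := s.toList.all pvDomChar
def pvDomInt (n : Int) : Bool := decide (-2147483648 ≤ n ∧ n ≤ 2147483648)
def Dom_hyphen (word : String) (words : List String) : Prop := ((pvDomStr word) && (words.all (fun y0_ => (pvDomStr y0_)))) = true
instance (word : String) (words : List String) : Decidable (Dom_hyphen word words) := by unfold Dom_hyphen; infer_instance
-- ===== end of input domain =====

-- B drops A's grouping dict and masked-key construction: it precomputes the fixed (non-hyphen)
-- positions and filters the candidates by per-position comparison (objective: simpler).

-- ===== PORT A =====
def hyphen (word : String) (words : List String) : Option (List String) :=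
  let w := word.toList
  let hyphens : List Nat := (List.range w.length).foldl
    (fun acc i => if w[i]? == some '-' then acc ++ [i] else acc) []
  let missing : PySem.Dict String (List String) := words.foldl
    (fun m i =>
      if i.toList.length = w.length then
        let key := hyphens.foldl (fun k j => k.set j '-') i.toList
        let keyS := String.ofList (PySem.Chars.lower key)
        match m.get? keyS with
        | some l => m.insert keyS (l ++ [i])
        | none   => m.insert keyS [i]
      else m) PySem.Dict.empty
  missing.get? word

-- ===== PORT B =====
def hyphen_alt (word : String) (words : List String) : Option (List String) :=
  let w := word.toList
  let fixed : List Nat := (List.range w.length).filter (fun k => !(w[k]? == some '-'))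
  let result := words.filter (fun i =>
    i.toList.length == w.length &&
      (fixed.all (fun k => (PySem.Chars.lower i.toList)[k]? == w[k]?)))
  if result.isEmpty then none else some result

-- ===== PRECONDITION & SPEC =====
def Spec_hyphen (word : String) (words : List String) (out : Option (List String)) : Prop := out = hyphen_alt word words
instance (word : String) (words : List String) (out : Option (List String)) : Decidable (Spec_hyphen word words out) := by unfold Spec_hyphen; infer_instance

-- ===== CLAIM (what is proved, stated in full; the proofs are below) =====
def Claim_equal_hyphen : Prop := ∀ (word : String) (words : List String), Dom_hyphen word words → Spec_hyphen word words (hyphen word words)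

-- ===== LEMMAS AND PROOFS =====

-- the list of hyphen positions of word (what A's first loop builds)
def hyphensOf (w : List Char) : List Nat :=
  (List.range w.length).filter (fun k => w[k]? == some '-')

-- the fixed (non-hyphen) positions (what B precomputes)
def fixedOf (w : List Char) : List Nat :=
  (List.range w.length).filter (fun k => !(w[k]? == some '-'))

-- B's per-candidate test
def matchB (w : List Char) (i : String) : Bool :=
  i.toList.length == w.length &&
    ((fixedOf w).all (fun k => (PySem.Chars.lower i.toList)[k]? == w[k]?))

-- A's dict-building loop body, with the hyphen list already named
def stepA (word : String) (m : PySem.Dict String (List String)) (i : String) :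
    PySem.Dict String (List String) :=
  if i.toList.length = word.toList.length then
    match m.get? (String.ofList (PySem.Chars.lower
        ((hyphensOf word.toList).foldl (fun k j => k.set j '-') i.toList))) with
    | some l => m.insert (String.ofList (PySem.Chars.lower
        ((hyphensOf word.toList).foldl (fun k j => k.set j '-') i.toList))) (l ++ [i])
    | none   => m.insert (String.ofList (PySem.Chars.lower
        ((hyphensOf word.toList).foldl (fun k j => k.set j '-') i.toList))) [i]
  else m

lemma hyphens_eq (w : List Char) :
    (List.range w.length).foldl
      (fun acc i => if w[i]? == some '-' then acc ++ [i] else acc) [] = hyphensOf w := by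
  rw [PySem.List.foldl_append_if (fun k => w[k]? == some '-') (fun k => k)]
  simp [hyphensOf, List.map_id']

lemma hyphen_eq_foldl (word : String) (words : List String) :
    hyphen word words = (words.foldl (stepA word) PySem.Dict.empty).get? word := by
  simp only [hyphen, hyphens_eq]
  rfl

lemma mem_hyphensOf (w : List Char) (k : Nat) :
    k ∈ hyphensOf w ↔ k < w.length ∧ w[k]? = some '-' := by
  simp [hyphensOf, List.mem_filter, List.mem_range]

lemma mem_fixedOf (w : List Char) (k : Nat) :
    k ∈ fixedOf w ↔ k < w.length ∧ ¬ w[k]? = some '-' := by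
  simp [fixedOf, List.mem_filter, List.mem_range]

lemma mask_getElem? (js : List Nat) (l : List Char) (k : Nat) :
    (js.foldl (fun a j => a.set j '-') l)[k]? =
      if k ∈ js ∧ k < l.length then some '-' else l[k]? := by
  induction js generalizing l with
  | nil => simp
  | cons j js ih =>
    simp only [List.foldl_cons]
    rw [ih]
    by_cases hk : k < l.length
    · by_cases hmem : k ∈ js
      · simp [List.length_set, hmem, hk]
      · simp only [List.length_set, hmem, false_and, if_false, List.mem_cons, or_false]
        rw [List.getElem?_set]
        by_cases hj : j = k
        · subst hj
          simp [hk]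
        · rw [if_neg hj, if_neg (by simp only [hk, and_true]; exact fun h => hj (Eq.symm h))]
    · have h2 : (l.set j '-')[k]? = none := by
        rw [List.getElem?_eq_none_iff, List.length_set]; omega
      simp only [List.length_set, hk, and_false, if_false, h2]
      rw [List.getElem?_eq_none_iff.mpr (by omega : l.length ≤ k)]

lemma key_eq_iff (word : String) (i : String)
    (hlen : i.toList.length = word.toList.length) :
    String.ofList (PySem.Chars.lower
        ((hyphensOf word.toList).foldl (fun k j => k.set j '-') i.toList)) = word ↔
      ((fixedOf word.toList).all
        (fun k => (PySem.Chars.lower i.toList)[k]? == word.toList[k]?)) = true := by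
  rw [String.ofList_eq, List.ext_getElem?_iff]
  simp only [PySem.Chars.lower, List.getElem?_map, mask_getElem?, List.all_eq_true, beq_iff_eq]
  constructor
  · intro h k hk
    rw [mem_fixedOf] at hk
    have := h k
    rw [if_neg (by rw [mem_hyphensOf]; tauto)] at this
    exact this
  · intro h k
    by_cases hk : k < word.toList.length
    · by_cases hh : word.toList[k]? = some '-'
      · rw [if_pos ⟨(mem_hyphensOf _ _).mpr ⟨hk, hh⟩, by omega⟩, hh]
        rfl
      · rw [if_neg (by rw [mem_hyphensOf]; tauto)]
        exact h k ((mem_fixedOf _ _).mpr ⟨hk, hh⟩)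
    · rw [if_neg (by omega)]
      have h1 : i.toList[k]? = none := by
        rw [List.getElem?_eq_none_iff]; omega
      have h2 : word.toList[k]? = none := by
        rw [List.getElem?_eq_none_iff]; omega
      simp [h1, h2]

lemma matchB_iff (word : String) (i : String) :
    matchB word.toList i = true ↔
      i.toList.length = word.toList.length ∧
      String.ofList (PySem.Chars.lower
        ((hyphensOf word.toList).foldl (fun k j => k.set j '-') i.toList)) = word := by
  unfold matchB
  rw [Bool.and_eq_true, beq_iff_eq]
  constructor
  · rintro ⟨h1, h2⟩
    exact ⟨h1, (key_eq_iff word i h1).mpr h2⟩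
  · rintro ⟨h1, h2⟩
    exact ⟨h1, (key_eq_iff word i h1).mp h2⟩

lemma foldl_stepA_get (word : String) (xs : List String)
    (m : PySem.Dict String (List String)) :
    (xs.foldl (stepA word) m).get? word =
      match m.get? word with
      | some l => some (l ++ xs.filter (matchB word.toList))
      | none =>
          if (xs.filter (matchB word.toList)).isEmpty then none
          else some (xs.filter (matchB word.toList)) := by
  induction xs generalizing m with
  | nil => cases hm : m.get? word <;> simp [hm]
  | cons i xs ih =>
    simp only [List.foldl_cons, List.filter_cons]
    by_cases hP : matchB word.toList i = true
    · obtain ⟨h1, h2⟩ := (matchB_iff word i).mp hP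
      have hstep : stepA word m i =
          match m.get? word with
          | some l => m.insert word (l ++ [i])
          | none => m.insert word [i] := by
        unfold stepA
        rw [if_pos h1, h2]
      rw [ih, hstep, hP]
      cases hm : m.get? word with
      | some l =>
        simp only [PySem.Dict.get?_insert_self]
        simp
      | none =>
        simp only [PySem.Dict.get?_insert_self]
        simp
    · rw [ih]
      have hstep : (stepA word m i).get? word = m.get? word := by
        unfold stepA
        by_cases h1 : i.toList.length = word.toList.length
        · rw [if_pos h1]
          have hne : String.ofList (PySem.Chars.lower
              ((hyphensOf word.toList).foldl (fun k j => k.set j '-') i.toList)) ≠ word := by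
            intro h
            exact hP ((matchB_iff word i).mpr ⟨h1, h⟩)
          cases hget : PySem.Dict.get? m (String.ofList (PySem.Chars.lower
              ((hyphensOf word.toList).foldl (fun k j => k.set j '-') i.toList))) with
          | some l => exact PySem.Dict.get?_insert_of_ne m _ (Ne.symm hne)
          | none => exact PySem.Dict.get?_insert_of_ne m _ (Ne.symm hne)
        · rw [if_neg h1]
      rw [hstep]
      simp [hP]

-- ===== VERDICT (by name: the statement is the Claim_ definition above) =====
theorem hyphen_spec : Claim_equal_hyphen := by
  intro word words _
  unfold Spec_hyphen hyphen_alt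
  rw [hyphen_eq_foldl, foldl_stepA_get]
  simp only [PySem.Dict.get?_empty]
  rfl
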